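-- pv_equiv track=rewrite | github.com/kennethsible/jellyfin-rpc | src/jellyfin_rpc/jellyfin_rpc.py | select_poster
-- ===== SOURCE A (Python) =====
-- def select_poster(posters: list[dict[str, str]], languages: list[str]) -> dict[str, str]:
--     matched_posters: list[dict[str, str]] = []
--     for lang_code in languages:
--         for poster in posters:
--             if poster.get('iso_639_1') == (lang_code or None):
--                 matched_posters.append(poster)
--         if matched_posters:
--             break
--     matched_posters.sort(key=lambda x: x['vote_count'], reverse=True)
--     return matched_posters[0] if matched_posters else posters[0]
-- ===== SOURCE B (Python) =====
-- def select_poster(posters: list[dict[str, str]], languages: list[str]) -> dict[str, str]: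
--     pref = {}
--     for i, lang in enumerate(languages):
--         key = lang or None
--         if key not in pref:
--             pref[key] = i
--     best = None
--     for poster in posters:
--         rank = pref.get(poster.get('iso_639_1'))
--         if rank is None:
--             continue
--         vote = poster.get('vote_count', '')
--         if best is None or rank < best[0] or (rank == best[0] and best[1] < vote):
--             best = (rank, vote, poster)
--     return best[2] if best is not None else posters[0]
-- ===== Notes on version B (the rewrite author's own statement) =====
-- stated objective: faster
-- what changed: Replaces A's languages-outer scan plus stable reverse sort of the matched posters by a first-occurrence rank table over languages and a single pass over posters keeping a running (lowest-rank, then highest-vote, earliest-on-ties) best.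
import Mathlib
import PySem

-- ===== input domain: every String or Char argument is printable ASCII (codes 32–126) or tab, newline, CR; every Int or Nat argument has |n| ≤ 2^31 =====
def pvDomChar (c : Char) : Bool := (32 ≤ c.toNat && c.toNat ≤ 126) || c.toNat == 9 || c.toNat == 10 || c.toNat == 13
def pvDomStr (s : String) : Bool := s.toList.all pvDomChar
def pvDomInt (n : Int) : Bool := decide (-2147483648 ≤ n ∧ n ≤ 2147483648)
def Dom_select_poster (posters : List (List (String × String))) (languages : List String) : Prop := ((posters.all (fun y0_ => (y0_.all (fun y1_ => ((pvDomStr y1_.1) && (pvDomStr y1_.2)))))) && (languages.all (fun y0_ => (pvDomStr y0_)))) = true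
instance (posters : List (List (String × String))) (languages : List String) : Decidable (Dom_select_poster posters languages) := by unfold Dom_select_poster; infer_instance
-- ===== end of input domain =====

-- B replaces A's languages-outer scan + stable reverse sort by a first-occurrence rank
-- table over languages and ONE pass over posters keeping the running (rank, vote)-best;
-- objective: alternative decomposition (equal return value proved below).

-- shared transliterations of the Python expressions `lang_code or None`,
-- `poster.get('iso_639_1')` and the vote_count key (total via getD ""; Pre_ excludes
-- the inputs where Python's x['vote_count'] would raise KeyError)
def pvTgt (lang : String) : Option String := if lang = "" then none else some lang
def pvIso (p : List (String × String)) : Option String := p.lookup "iso_639_1"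
def pvVoteKey (p : List (String × String)) : String := (p.lookup "vote_count").getD ""

-- ===== PORT A =====
-- inner `for poster in posters: if …: matched_posters.append(poster)`
def pvMatchOne (posters : List (List (String × String))) (lang : String)
    (acc : List (List (String × String))) : List (List (String × String)) :=
  posters.foldl (fun a p => if pvIso p == pvTgt lang then a ++ [p] else a) acc

-- outer `for lang_code in languages: …; if matched_posters: break`
def pvALoop (posters : List (List (String × String))) (acc : List (List (String × String))) :
    List String → List (List (String × String))
  | [] => acc
  | l :: ls =>
      let acc' := pvMatchOne posters l acc
      if acc' = [] then pvALoop posters acc' ls else acc'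

def select_poster (posters : List (List (String × String))) (languages : List String) :
    List (String × String) :=
  let matched := pvALoop posters [] languages
  let sortedM := PySem.List.sorted matched pvVoteKey true
  -- `return matched_posters[0] if matched_posters else posters[0]` (posters[0] total via getD;
  -- Pre_ excludes the empty-posters IndexError case)
  if matched.isEmpty then (PySem.List.pyGet? posters 0).getD [] else sortedM.headD []

-- ===== PORT B =====
-- `pref = {}; for i, lang in enumerate(languages): key = lang or None; if key not in pref: pref[key] = i`
def pvPref (languages : List String) : PySem.Dict (Option String) Int :=
  (PySem.List.enumerate languages 0).foldl
    (fun d il => if d.contains (pvTgt il.2) then d else d.insert (pvTgt il.2) il.1)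
    PySem.Dict.empty

-- one poster of the single pass: look up its rank, keep the strictly better (rank, vote) best
def pvBStep (pref : PySem.Dict (Option String) Int)
    (best : Option (Int × String × List (String × String))) (p : List (String × String)) :
    Option (Int × String × List (String × String)) :=
  match PySem.Dict.get? pref (pvIso p) with
  | none => best
  | some r =>
      let v := pvVoteKey p
      match best with
      | none => some (r, v, p)
      | some (br, bv, _) => if r < br ∨ (r = br ∧ bv < v) then some (r, v, p) else best

def select_poster_alt (posters : List (List (String × String))) (languages : List String) :
    List (String × String) :=
  match posters.foldl (pvBStep (pvPref languages)) none with
  | some (_, _, p) => p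
  | none => (PySem.List.pyGet? posters 0).getD []

-- ===== PRECONDITION & SPEC =====
-- Pre_ excludes exactly the inputs where Python A raises: a KeyError when some poster
-- matched by the first matching preferred language lacks 'vote_count', and an IndexError
-- when no language matches and posters is empty.
def Pre_select_poster (posters : List (List (String × String))) (languages : List String) : Prop :=
  (match languages.find? (fun l => !(posters.filter (fun p => pvIso p == pvTgt l)).isEmpty) with
   | some l => (posters.filter (fun p => pvIso p == pvTgt l)).all (fun p => (p.lookup "vote_count").isSome)
   | none => !posters.isEmpty) = true

instance (posters : List (List (String × String))) (languages : List String) :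
    Decidable (Pre_select_poster posters languages) := by unfold Pre_select_poster; infer_instance

def pvWitness_select_poster : (List (List (String × String))) × List String :=
  ([[("iso_639_1", "en"), ("vote_count", "5")]], ["en"])

def Spec_select_poster (posters : List (List (String × String))) (languages : List String)
    (out : List (String × String)) : Prop := out = select_poster_alt posters languages
instance (posters : List (List (String × String))) (languages : List String)
    (out : List (String × String)) : Decidable (Spec_select_poster posters languages out) := by
  unfold Spec_select_poster; infer_instance

-- ===== CLAIM (what is proved, stated in full; the proofs are below) =====
def Claim_equal_select_poster : Prop := ∀ (posters : List (List (String × String))) (languages : List String), Dom_select_poster posters languages → Pre_select_poster posters languages → Spec_select_poster posters languages (select_poster posters languages)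

-- ===== LEMMAS AND PROOFS =====

-- abstract rank form of B's step (pvBStep pref is definitionally pvStep of the pref lookup)
def pvStep (rkf : List (String × String) → Option Int)
    (best : Option (Int × String × List (String × String))) (p : List (String × String)) :
    Option (Int × String × List (String × String)) :=
  match rkf p with
  | none => best
  | some r =>
      let v := pvVoteKey p
      match best with
      | none => some (r, v, p)
      | some (br, bv, _) => if r < br ∨ (r = br ∧ bv < v) then some (r, v, p) else best

-- first-occurrence rank of a poster's language in `languages`
def pvRnk (languages : List String) (p : List (String × String)) : Option Int :=
  (languages.findIdx? (fun l => pvTgt l == pvIso p)).map (fun n => (n : Int))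

-- running earliest-maximum of pvVoteKey
def pvRun (t : List (List (String × String))) (q : List (String × String)) :
    List (String × String) :=
  t.foldl (fun b p => if pvVoteKey b < pvVoteKey p then p else b) q

lemma pvBStep_eq_pvStep (pref : PySem.Dict (Option String) Int) :
    pvBStep pref = pvStep (fun p => PySem.Dict.get? pref (pvIso p)) := rfl

-- pref lookup: once a key is present, the rest of the build never changes it
lemma pvPref_build_contains (k : Option String) :
    ∀ (il : List (Int × String)) (d : PySem.Dict (Option String) Int), d.contains k →
      PySem.Dict.get? (il.foldl (fun d il =>
          if d.contains (pvTgt il.2) then d else d.insert (pvTgt il.2) il.1) d) k =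
        PySem.Dict.get? d k := by
  intro il
  induction il with
  | nil => intro d _; rfl
  | cons x xs ih =>
      intro d hd
      simp only [List.foldl_cons]
      by_cases hc : d.contains (pvTgt x.2)
      · simp [hc, ih d hd]
      · have h1 : (d.insert (pvTgt x.2) x.1).contains k := by
          by_cases hk : pvTgt x.2 = k
          · subst hk; simp [hc] at hd
          · simp [PySem.Dict.contains_insert, hd]
        by_cases hk : pvTgt x.2 = k
        · subst hk; simp [hc] at hd
        · rw [if_neg hc]
          rw [ih _ h1, PySem.Dict.get?_insert_of_ne _ _ (fun h => hk h.symm)]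

lemma pvPref_build_get (k : Option String) :
    ∀ (ls : List String) (s : Int) (d : PySem.Dict (Option String) Int), d.contains k = false →
      PySem.Dict.get? ((PySem.List.enumerate ls s).foldl (fun d il =>
          if d.contains (pvTgt il.2) then d else d.insert (pvTgt il.2) il.1) d) k =
        (ls.findIdx? (fun l => pvTgt l == k)).map (fun n => s + (n : Int)) := by
  intro ls
  induction ls with
  | nil =>
      intro s d hd
      simp only [PySem.List.enumerate_nil, List.foldl_nil, List.findIdx?_nil]
      exact (PySem.Dict.get?_eq_none_iff_contains d k).mpr hd
  | cons l ls ih =>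
      intro s d hd
      simp only [PySem.List.enumerate_cons, List.foldl_cons, List.findIdx?_cons]
      by_cases hk : pvTgt l = k
      · have hc : d.contains (pvTgt l) = false := by rw [hk]; exact hd
        have hbk : (pvTgt l == k) = true := by simp [hk]
        rw [if_neg (by simp [hc] : ¬ (d.contains (pvTgt l) = true)), if_pos hbk]
        have h1 : (d.insert (pvTgt l) s).contains k := by rw [hk]; exact PySem.Dict.contains_insert_self _ _ _
        rw [pvPref_build_contains k _ _ h1]
        rw [hk, PySem.Dict.get?_insert_self]
        simp
      · have hbk : ¬ ((pvTgt l == k) = true) := by simp [hk]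
        rw [if_neg hbk]
        have goal_rhs : ((ls.findIdx? (fun l => pvTgt l == k)).map (fun i => i + 1)).map
            (fun n : Nat => s + (n : Int)) =
            (ls.findIdx? (fun l => pvTgt l == k)).map (fun n => s + 1 + (n : Int)) := by
          cases ls.findIdx? (fun l => pvTgt l == k) with
          | none => simp
          | some n => simp; ring
        by_cases hc : d.contains (pvTgt l) = true
        · rw [if_pos hc, ih (s+1) d hd, ← goal_rhs]
          cases ls.findIdx? (fun l => pvTgt l == k) <;> simp
        · rw [if_neg hc]
          have hd' : (d.insert (pvTgt l) s).contains k = false := by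
            simp [PySem.Dict.contains_insert, hd]
            exact fun h => hk h.symm
          rw [ih (s+1) _ hd', ← goal_rhs]
          cases ls.findIdx? (fun l => pvTgt l == k) <;> simp

-- pref lookup is the first-occurrence index: build lemma specialised
lemma pvPref_get (languages : List String) (p : List (String × String)) :
    PySem.Dict.get? (pvPref languages) (pvIso p) = pvRnk languages p := by
  unfold pvPref pvRnk
  rw [pvPref_build_get (pvIso p) languages 0 PySem.Dict.empty
    (PySem.Dict.contains_empty _)]
  cases languages.findIdx? (fun l => pvTgt l == pvIso p) <;> simp

-- a fold step with an everywhere-none rank is the identity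
lemma pvFold_none (rkf : List (String × String) → Option Int)
    (ps : List (List (String × String))) (b : Option (Int × String × List (String × String)))
    (h : ∀ p ∈ ps, rkf p = none) : ps.foldl (pvStep rkf) b = b := by
  induction ps generalizing b with
  | nil => rfl
  | cons p ps ih =>
      rw [List.foldl_cons]
      have hp : rkf p = none := h p (by simp)
      have : pvStep rkf b p = b := by simp [pvStep, hp]
      rw [this]
      exact ih _ (fun q hq => h q (by simp [hq]))

-- shifting every rank by +1 shifts the fold state by +1
lemma pvFold_shift (rkf1 rkf2 : List (String × String) → Option Int) :
    ∀ (ps : List (List (String × String))),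
      (∀ p ∈ ps, rkf2 p = (rkf1 p).map (fun r => r + 1)) →
      ∀ b, ps.foldl (pvStep rkf2) (b.map (fun rvq => (rvq.1 + 1, rvq.2))) =
        (ps.foldl (pvStep rkf1) b).map (fun rvq => (rvq.1 + 1, rvq.2)) := by
  intro ps
  induction ps with
  | nil => intro _ b; rfl
  | cons p ps ih =>
      intro h b
      rw [List.foldl_cons, List.foldl_cons]
      have hstep : pvStep rkf2 (b.map (fun rvq => (rvq.1 + 1, rvq.2))) p =
          (pvStep rkf1 b p).map (fun rvq => (rvq.1 + 1, rvq.2)) := by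
        have h2 : rkf2 p = (rkf1 p).map (fun r => r + 1) := h p (by simp)
        cases hrk : rkf1 p with
        | none => simp [pvStep, h2, hrk]
        | some r =>
            cases b with
            | none => simp [pvStep, h2, hrk]
            | some t =>
                obtain ⟨br, bv, bq⟩ := t
                have e1 : (r + 1 < br + 1) = (r < br) := by
                  simp only [eq_iff_iff]; omega
                have e2 : (r + 1 = br + 1) = (r = br) := by
                  simp only [eq_iff_iff]; omega
                simp only [pvStep, h2, hrk, Option.map_some, e1, e2]
                split_ifs <;> rfl
      rw [hstep]
      exact ih (fun q hq => h q (by simp [hq])) (pvStep rkf1 b p)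

-- from a rank-0 state, the fold is the running earliest-max over the rank-0 posters
lemma pvFold_zero_state (rkf : List (String × String) → Option Int) :
    ∀ (ps : List (List (String × String))) (q : List (String × String)),
      (∀ p ∈ ps, ∀ r, rkf p = some r → 0 ≤ r) →
      ps.foldl (pvStep rkf) (some (0, pvVoteKey q, q)) =
        some (0, pvVoteKey (pvRun (ps.filter (fun p => rkf p == some 0)) q),
               pvRun (ps.filter (fun p => rkf p == some 0)) q) := by
  intro ps
  induction ps with
  | nil => intro q _; rfl
  | cons p ps ih =>
      intro q hpos
      have hpos' : ∀ p ∈ ps, ∀ r, rkf p = some r → 0 ≤ r :=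
        fun x hx => hpos x (by simp [hx])
      rw [List.foldl_cons]
      cases hrk : rkf p with
      | none =>
          have : pvStep rkf (some (0, pvVoteKey q, q)) p = some (0, pvVoteKey q, q) := by
            simp [pvStep, hrk]
          rw [this, List.filter_cons_of_neg (by simp [hrk]), ih q hpos']
      | some r =>
          by_cases hr : r = 0
          · subst hr
            have hstep : pvStep rkf (some (0, pvVoteKey q, q)) p =
                some (0, pvVoteKey (if pvVoteKey q < pvVoteKey p then p else q),
                      if pvVoteKey q < pvVoteKey p then p else q) := by
              by_cases hv : pvVoteKey q < pvVoteKey p <;>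
                simp [pvStep, hrk, hv]
            rw [hstep, List.filter_cons_of_pos (by simp [hrk]), ih _ hpos']
            unfold pvRun
            rw [List.foldl_cons]
          · have hlt : ¬ (r < 0 ∨ (r = 0 ∧ pvVoteKey q < pvVoteKey p)) := by
              have := hpos p (by simp) r hrk
              rintro (h | ⟨h, -⟩) <;> omega
            have : pvStep rkf (some (0, pvVoteKey q, q)) p = some (0, pvVoteKey q, q) := by
              simp only [pvStep, hrk]
              rw [if_neg hlt]
            rw [this, List.filter_cons_of_neg (by simp [hrk, hr]), ih q hpos']

-- with nonnegative ranks and some rank-0 poster present, the fold lands on rank 0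
lemma pvFold_zero (rkf : List (String × String) → Option Int) :
    ∀ (ps : List (List (String × String))) (b : Option (Int × String × List (String × String)))
      (h t : _), (∀ p ∈ ps, ∀ r, rkf p = some r → 0 ≤ r) →
      (b = none ∨ ∃ r v q, b = some (r, v, q) ∧ 0 < r) →
      ps.filter (fun p => rkf p == some 0) = h :: t →
      ps.foldl (pvStep rkf) b = some (0, pvVoteKey (pvRun t h), pvRun t h) := by
  intro ps
  induction ps with
  | nil => intro b h t _ _ hf; simp at hf
  | cons p ps ih =>
      intro b h t hpos hb hf
      have hpos' : ∀ p ∈ ps, ∀ r, rkf p = some r → 0 ≤ r :=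
        fun x hx => hpos x (by simp [hx])
      rw [List.foldl_cons]
      cases hrk : rkf p with
      | none =>
          rw [List.filter_cons_of_neg (by simp [hrk])] at hf
          have : pvStep rkf b p = b := by simp [pvStep, hrk]
          rw [this]
          exact ih b h t hpos' hb hf
      | some r =>
          by_cases hr : r = 0
          · subst hr
            rw [List.filter_cons_of_pos (by simp [hrk])] at hf
            obtain ⟨rfl, rfl⟩ : p = h ∧ ps.filter (fun p => rkf p == some 0) = t := by
              constructor
              · exact (List.cons.injEq _ _ _ _ ▸ hf).1
              · exact (List.cons.injEq _ _ _ _ ▸ hf).2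
            have hstep : pvStep rkf b p = some (0, pvVoteKey p, p) := by
              rcases hb with rfl | ⟨br, bv, bq, rfl, hbr⟩
              · simp [pvStep, hrk]
              · simp only [pvStep, hrk]
                rw [if_pos (Or.inl hbr)]
            rw [hstep]
            exact pvFold_zero_state rkf ps p hpos' ▸ by
              rw [pvFold_zero_state rkf ps p hpos']
          · have hb' : pvStep rkf b p = none ∨
                ∃ r' v q, pvStep rkf b p = some (r', v, q) ∧ 0 < r' := by
              have hrpos : 0 ≤ r := hpos p (by simp) r hrk
              have hrp : 0 < r := lt_of_le_of_ne hrpos (fun h => hr h.symm)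
              rcases hb with rfl | ⟨br, bv, bq, rfl, hbr⟩
              · exact Or.inr ⟨r, pvVoteKey p, p, by simp [pvStep, hrk], hrp⟩
              · simp only [pvStep, hrk]
                by_cases hc : r < br ∨ (r = br ∧ bv < pvVoteKey p)
                · exact Or.inr ⟨r, pvVoteKey p, p, by rw [if_pos hc], hrp⟩
                · exact Or.inr ⟨br, bv, bq, by rw [if_neg hc], hbr⟩
            rw [List.filter_cons_of_neg (by simp [hrk, hr])] at hf
            exact ih _ h t hpos' hb' hf

-- head of the stable reverse insertion step
lemma head?_insertBy (x : List (String × String)) (ys : List (List (String × String))) :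
    (PySem.List.insertBy (fun a b => decide (pvVoteKey b < pvVoteKey a)) x ys).head? =
      some (match ys.head? with
            | none => x
            | some h => if pvVoteKey h < pvVoteKey x then x else h) := by
  cases ys with
  | nil => rfl
  | cons y ys =>
      by_cases hv : pvVoteKey y < pvVoteKey x <;>
        simp [PySem.List.insertBy, hv]

-- head of the foldl of insertBy is the running earliest-max fold
lemma head?_foldl_insertBy :
    ∀ (xs acc : List (List (String × String))),
      (xs.foldl (fun acc x =>
          PySem.List.insertBy (fun a b => decide (pvVoteKey b < pvVoteKey a)) x acc) acc).head? =
        xs.foldl (fun ob x => some (match ob with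
          | none => x
          | some b => if pvVoteKey b < pvVoteKey x then x else b)) acc.head? := by
  intro xs
  induction xs with
  | nil => intro acc; rfl
  | cons x xs ih =>
      intro acc
      rw [List.foldl_cons, List.foldl_cons, ih, head?_insertBy]

-- the option-valued running max from a some-state is pvRun
lemma opt_run :
    ∀ (t : List (List (String × String))) (q : List (String × String)),
      t.foldl (fun ob x => some (match ob with
          | none => x
          | some b => if pvVoteKey b < pvVoteKey x then x else b)) (some q) = some (pvRun t q) := by
  intro t
  induction t with
  | nil => intro q; rfl
  | cons x t ih =>
      intro q
      rw [List.foldl_cons]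
      show t.foldl _ (some (if pvVoteKey q < pvVoteKey x then x else q)) = _
      rw [ih]
      unfold pvRun
      rw [List.foldl_cons]

-- head of the stable reverse sort is the running earliest-max
lemma head?_sorted_rev (h : List (String × String)) (t : List (List (String × String))) :
    (PySem.List.sorted (h :: t) pvVoteKey true).head? = some (pvRun t h) := by
  rw [PySem.List.sorted_rev_eq_foldl_insertBy, head?_foldl_insertBy, List.foldl_cons]
  show t.foldl _ (some h) = _
  exact opt_run t h

-- B's port written with the abstract rank function
lemma alt_char (posters : List (List (String × String))) (languages : List String) :
    select_poster_alt posters languages =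
      match posters.foldl (pvStep (pvRnk languages)) none with
      | some t => t.2.2
      | none => (PySem.List.pyGet? posters 0).getD [] := by
  unfold select_poster_alt
  rw [pvBStep_eq_pvStep]
  have : (fun p => PySem.Dict.get? (pvPref languages) (pvIso p)) = pvRnk languages :=
    funext (pvPref_get languages)
  rw [this]
  rcases posters.foldl (pvStep (pvRnk languages)) none with _ | ⟨r, v, p⟩ <;> rfl

lemma rnk_nonneg (languages : List String) (p : List (String × String)) :
    ∀ r, pvRnk languages p = some r → 0 ≤ r := by
  intro r h
  unfold pvRnk at h
  cases hf : languages.findIdx? (fun l => pvTgt l == pvIso p) with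
  | none => rw [hf] at h; simp at h
  | some n => rw [hf] at h; simp at h; omega

-- the two ports agree on every input
lemma ports_eq (posters : List (List (String × String))) (languages : List String) :
    select_poster posters languages = select_poster_alt posters languages := by
  induction languages with
  | nil =>
      unfold select_poster pvALoop
      rw [alt_char]
      have : ∀ p ∈ posters, pvRnk [] p = none := by
        intro p _; unfold pvRnk; simp
      rw [pvFold_none _ _ _ this]
      simp
  | cons l ls ih =>
      have hmatch : pvMatchOne posters l [] = posters.filter (fun p => pvIso p == pvTgt l) := by
        unfold pvMatchOne
        have := PySem.List.foldl_append_if (fun p => pvIso p == pvTgt l)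
          (fun p => p) posters []
        simpa using this
      cases hm : posters.filter (fun p => pvIso p == pvTgt l) with
      | nil =>
          -- no poster matches l: A skips l, B's ranks all shift by one
          have hAloop : pvALoop posters [] (l :: ls) = pvALoop posters [] ls := by
            rw [show pvALoop posters [] (l :: ls) =
              (if pvMatchOne posters l [] = [] then
                pvALoop posters (pvMatchOne posters l []) ls
              else pvMatchOne posters l []) from rfl]
            rw [hmatch, hm]
            simp
          have hA : select_poster posters (l :: ls) = select_poster posters ls := by
            unfold select_poster
            rw [hAloop]
          have hnol : ∀ p ∈ posters, (pvIso p == pvTgt l) = false := by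
            intro p hp
            have h1 := List.filter_eq_nil_iff.mp hm p hp
            simp only [Bool.not_eq_true] at h1
            exact h1
          have hshift : ∀ p ∈ posters, pvRnk (l :: ls) p = (pvRnk ls p).map (fun r => r + 1) := by
            intro p hp
            unfold pvRnk
            rw [List.findIdx?_cons]
            have hsym : (pvTgt l == pvIso p) = false := by
              have h1 := hnol p hp
              rw [beq_eq_false_iff_ne] at h1 ⊢
              exact Ne.symm h1
            rw [hsym]
            simp only [Bool.false_eq_true, if_false]
            cases ls.findIdx? (fun l => pvTgt l == pvIso p) <;> simp
          have hB : select_poster_alt posters (l :: ls) = select_poster_alt posters ls := by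
            rw [alt_char, alt_char]
            have := pvFold_shift (pvRnk ls) (pvRnk (l :: ls)) posters hshift none
            simp only [Option.map_none] at this
            rw [this]
            rcases posters.foldl (pvStep (pvRnk ls)) none with _ | ⟨r, v, p⟩ <;> rfl
          rw [hA, hB, ih]
      | cons h t =>
          -- l is the first matching language: A sorts the match set, B folds over rank-0 posters
          have hAloop : pvALoop posters [] (l :: ls) = h :: t := by
            rw [show pvALoop posters [] (l :: ls) =
              (if pvMatchOne posters l [] = [] then
                pvALoop posters (pvMatchOne posters l []) ls
              else pvMatchOne posters l []) from rfl]
            rw [hmatch, hm]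
            simp
          have hA : select_poster posters (l :: ls) = pvRun t h := by
            unfold select_poster
            rw [hAloop]
            simp only [List.isEmpty_cons, Bool.false_eq_true, if_false]
            rw [List.headD_eq_head?_getD, head?_sorted_rev]
            rfl
          have hfilter : posters.filter (fun p => pvRnk (l :: ls) p == some 0) = h :: t := by
            rw [← hm]
            apply List.filter_congr
            intro p _
            unfold pvRnk
            rw [List.findIdx?_cons]
            by_cases hpl : pvIso p = pvTgt l
            · simp [List.findIdx?_cons, hpl]
            · have hne : (pvTgt l == pvIso p) = false := by
                rw [beq_eq_false_iff_ne]; exact fun hh => hpl hh.symm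
              have hne2 : (pvIso p == pvTgt l) = false := by
                rw [beq_eq_false_iff_ne]; exact hpl
              cases hf : ls.findIdx? (fun l => pvTgt l == pvIso p) with
              | none => simp [List.findIdx?_cons, hne, hne2]
              | some n =>
                  simp [List.findIdx?_cons, hne, hne2]
                  omega
          have hB : select_poster_alt posters (l :: ls) = pvRun t h := by
            rw [alt_char]
            rw [pvFold_zero (pvRnk (l :: ls)) posters none h t
              (fun p _ => rnk_nonneg _ p) (Or.inl rfl) hfilter]
          rw [hA, hB]

-- ===== VERDICT (by name: the statement is the Claim_ definition above) =====
theorem select_poster_spec : Claim_equal_select_poster := by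
  intro posters languages _ _
  unfold Spec_select_poster
  exact ports_eq posters languages
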